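-- pv_equiv track=rewrite | github.com/shepherdvovkes/ETHL2 | polkadot/polkadot_quicknode_retriever.py | calculate_block_ranges
-- ===== SOURCE A (Python) =====
-- from typing import Dict, List, Optional, Any, Tuple
--
-- def calculate_block_ranges(current_block: int, num_workers: int, blocks_per_worker: int = 1000) -> List[Tuple[int, int]]:
--     """Calculate block ranges for each worker"""
--     ranges = []
--     start_block = current_block + 1
--
--     for i in range(num_workers):
--         end_block = start_block + blocks_per_worker - 1
--         ranges.append((start_block, end_block))
--         start_block = end_block + 1
--
--     return ranges
-- ===== SOURCE B (Python) =====
-- from typing import List, Tuple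
--
-- def calculate_block_ranges(current_block: int, num_workers: int, blocks_per_worker: int = 1000) -> List[Tuple[int, int]]:
--     """Calculate block ranges for each worker (closed form per worker index)"""
--     return [(current_block + 1 + i * blocks_per_worker,
--              current_block + (i + 1) * blocks_per_worker)
--             for i in range(num_workers)]
-- ===== Notes on version B (the rewrite author's own statement) =====
-- stated objective: simpler
-- what changed: Replaces the loop that threads a running start_block accumulator with a closed-form per-index computation: each worker's range is derived directly from i by arithmetic in a comprehension.
import Mathlib
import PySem

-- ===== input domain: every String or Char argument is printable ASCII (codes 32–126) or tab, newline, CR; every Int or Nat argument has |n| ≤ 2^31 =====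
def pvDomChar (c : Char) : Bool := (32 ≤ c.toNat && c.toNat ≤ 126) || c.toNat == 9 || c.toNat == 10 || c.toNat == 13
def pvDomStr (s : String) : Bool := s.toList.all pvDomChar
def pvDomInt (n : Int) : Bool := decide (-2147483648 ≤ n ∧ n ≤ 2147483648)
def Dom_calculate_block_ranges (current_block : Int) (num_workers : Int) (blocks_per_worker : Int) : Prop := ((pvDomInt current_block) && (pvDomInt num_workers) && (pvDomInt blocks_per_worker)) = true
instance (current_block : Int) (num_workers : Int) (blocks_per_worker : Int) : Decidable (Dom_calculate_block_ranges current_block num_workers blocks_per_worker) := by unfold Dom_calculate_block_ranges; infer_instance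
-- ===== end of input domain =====

-- B replaces A's running start_block accumulator with a closed-form range per worker index (simpler decomposition).

-- ===== PORT A =====
-- for i in range(num_workers): append (start_block, start_block+bpw-1); start_block advances
def calculate_block_ranges (current_block : Int) (num_workers : Int) (blocks_per_worker : Int) : List (Int × Int) :=
  let st := (PySem.List.pyRange 0 num_workers 1).foldl
    (fun (st : List (Int × Int) × Int) _i =>
      let end_block := st.2 + blocks_per_worker - 1
      (st.1 ++ [(st.2, end_block)], end_block + 1))
    ([], current_block + 1)
  st.1

-- ===== PORT B =====
-- comprehension: each range computed directly from i
def calculate_block_ranges_alt (current_block : Int) (num_workers : Int) (blocks_per_worker : Int) : List (Int × Int) :=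
  (PySem.List.pyRange 0 num_workers 1).map
    (fun i => (current_block + 1 + i * blocks_per_worker, current_block + (i + 1) * blocks_per_worker))

-- ===== PRECONDITION & SPEC =====
def Spec_calculate_block_ranges (current_block : Int) (num_workers : Int) (blocks_per_worker : Int) (out : List (Int × Int)) : Prop := out = calculate_block_ranges_alt current_block num_workers blocks_per_worker
instance (current_block : Int) (num_workers : Int) (blocks_per_worker : Int) (out : List (Int × Int)) : Decidable (Spec_calculate_block_ranges current_block num_workers blocks_per_worker out) := by unfold Spec_calculate_block_ranges; infer_instance

-- ===== CLAIM (what is proved, stated in full; the proofs are below) =====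
def Claim_equal_calculate_block_ranges : Prop := ∀ (current_block : Int) (num_workers : Int) (blocks_per_worker : Int), Dom_calculate_block_ranges current_block num_workers blocks_per_worker → Spec_calculate_block_ranges current_block num_workers blocks_per_worker (calculate_block_ranges current_block num_workers blocks_per_worker)

-- ===== LEMMAS AND PROOFS =====

-- A's fold over the first n indices, characterised in closed form (induction on n).
theorem pvFold_char (b : Int) (n : Nat) (acc : List (Int × Int)) (s : Int) :
    ((List.range n).map (fun k : Nat => ((0:Int) + k))).foldl
      (fun (st : List (Int × Int) × Int) _i =>
        let e := st.2 + b - 1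
        (st.1 ++ [(st.2, e)], e + 1))
      (acc, s)
    = (acc ++ (List.range n).map (fun k : Nat => (s + k * b, s + k * b + b - 1)), s + n * b) := by
  induction n generalizing acc s with
  | zero => simp
  | succ m ih =>
      rw [List.range_succ]
      simp only [List.map_append, List.foldl_append, ih, List.map_cons, List.map_nil,
        List.foldl_cons, List.foldl_nil]
      simp only [Prod.mk.injEq]
      refine ⟨by rw [List.append_assoc], by push_cast; ring⟩

-- ===== VERDICT (by name: the statement is the Claim_ definition above) =====
theorem calculate_block_ranges_spec : Claim_equal_calculate_block_ranges := by
  intro c n b _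
  unfold Spec_calculate_block_ranges calculate_block_ranges calculate_block_ranges_alt
  rw [PySem.List.pyRange_one]
  simp only [sub_zero]
  rw [pvFold_char]
  simp only [List.nil_append, List.map_map]
  apply List.map_congr_left
  intro k _
  simp only [Function.comp, Prod.mk.injEq]
  refine ⟨by ring, by ring⟩
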